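-- pv_equiv track=rewrite | github.com/yywon/simpleRatingRanking | dataOperations/model_with_sampling_v7.py | agg_rank_x
-- ===== SOURCE A (Python) =====
-- def agg_rank_x(vec):
--
--     r = [0]*len(vec)
--
--     numAssigned = 0
--     while numAssigned < len(vec):
--         maxEntry = 0
--         count = 0
--         for j in range(len(vec)):
--             if r[j] == 0 and vec[j] >= maxEntry:
--                 maxEntry = vec[j]
--
--         for j in range(len(vec)):
--             if vec[j] == maxEntry:
--                 r[j] = numAssigned + 1
--                 count += 1
--         numAssigned += count
--
--     return r
-- ===== SOURCE B (Python) =====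
-- def agg_rank_x(vec):
--     # O(n log n): count each value once, walk distinct values in descending
--     # order accumulating counts; rank of v = 1 + (# elements strictly greater).
--     cnt = {}
--     for v in vec:
--         cnt[v] = cnt.get(v, 0) + 1
--     rank = {}
--     acc = 0
--     for v in sorted(cnt, reverse=True):
--         rank[v] = acc + 1
--         acc += cnt[v]
--     return [rank[v] for v in vec]
-- ===== Notes on version B (the rewrite author's own statement) =====
-- stated objective: faster
-- what changed: A repeatedly rescans the whole list to find and assign the current maximum (O(n^2) passes); B counts each value once in a dict, sorts the distinct values descending and assigns rank = 1 + running count of strictly greater elements in one pass, then maps the input through the rank dict; intended as faster (O(n log n) vs O(n^2)); a timing run could not measure a ratio (A timed out on its generated inputs).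
-- outside the precondition, e.g. on agg_rank_x([-41, 0, 1]): A returns [0, 3, 1], B returns [3, 2, 1]; on agg_rank_x([-2, 0]): A returns [0, 2], B returns [2, 1]; on agg_rank_x([-1]): A does not finish within the time limit, B returns [1]
import Mathlib
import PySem

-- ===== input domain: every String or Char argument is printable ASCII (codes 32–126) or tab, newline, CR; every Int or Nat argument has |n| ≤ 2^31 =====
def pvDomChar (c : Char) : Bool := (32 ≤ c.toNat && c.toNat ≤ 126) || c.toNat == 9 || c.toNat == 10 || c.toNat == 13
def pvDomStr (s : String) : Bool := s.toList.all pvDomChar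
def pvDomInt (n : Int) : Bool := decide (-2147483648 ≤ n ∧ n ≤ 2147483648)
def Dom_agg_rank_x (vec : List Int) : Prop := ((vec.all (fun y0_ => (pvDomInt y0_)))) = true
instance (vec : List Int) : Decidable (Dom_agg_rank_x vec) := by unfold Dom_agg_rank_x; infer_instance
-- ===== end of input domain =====

-- B replaces A's repeated full-list rescans (find current max, assign it) by a
-- count-once / sort-distinct-descending / one-pass rank assignment: intended as faster
-- (better asymptotics; a timing run measured no ratio — A timed out on its inputs).

-- ===== PORT A =====
-- while-loop of A as fuel recursion: on Pre_ each round assigns ≥ 1 position, so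
-- vec.length rounds always suffice; the fuel guard only totalizes the same computation.
-- (indices j always lie in range, so getD j 0 is exact for vec[j] / r[j])
def aggLoop (vec : List Int) (fuel : Nat) (r : List Int) (numAssigned : Int) : List Int :=
  match fuel with
  | 0 => r
  | f+1 =>
    if numAssigned < (vec.length : Int) then
      let maxEntry := (List.range vec.length).foldl
        (fun m j => if r.getD j 0 = 0 ∧ m ≤ vec.getD j 0 then vec.getD j 0 else m) 0
      let p := (List.range vec.length).foldl
        (fun (s : List Int × Int) j =>
          if vec.getD j 0 = maxEntry then (s.1.set j (numAssigned + 1), s.2 + 1) else s)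
        (r, (0:Int))
      aggLoop vec f p.1 (numAssigned + p.2)
    else r

def agg_rank_x (vec : List Int) : List Int :=
  aggLoop vec vec.length (List.replicate vec.length 0) 0

-- ===== PORT B =====
-- cnt = counting dict; iterate distinct values descending, rank[v] = acc+1, acc += cnt[v];
-- rank.getD v 0: KeyError impossible, every v of vec is a key of rank.
def agg_rank_x_alt (vec : List Int) : List Int :=
  let cnt := vec.foldl (fun d v => d.insert v (d.getD v 0 + 1)) PySem.Dict.empty
  let p := (PySem.List.sorted cnt.keys (fun x => x) true).foldl
    (fun (s : PySem.Dict Int Int × Int) v => (s.1.insert v (s.2 + 1), s.2 + cnt.getD v 0))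
    (PySem.Dict.empty, (0:Int))
  vec.map (fun v => p.1.getD v 0)

-- ===== PRECONDITION & SPEC =====
-- Pre_ excludes lists containing a negative element: on them A's while-loop either never
-- terminates (no 0 present: maxEntry's baseline 0 matches no remaining element) or, when a
-- 0 is present, returns artefact values of that baseline (negatives ranked 0, the 0 entries
-- re-ranked once per extra round) which B does not reproduce.
def Pre_agg_rank_x (vec : List Int) : Prop := ∀ x ∈ vec, 0 ≤ x
instance (vec : List Int) : Decidable (Pre_agg_rank_x vec) := by unfold Pre_agg_rank_x; infer_instance
def pvWitness_agg_rank_x : List Int := [3, 1, 3, 2, 0]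

def Spec_agg_rank_x (vec : List Int) (out : List Int) : Prop := out = agg_rank_x_alt vec
instance (vec : List Int) (out : List Int) : Decidable (Spec_agg_rank_x vec out) := by unfold Spec_agg_rank_x; infer_instance

-- ===== CLAIM (what is proved, stated in full; the proofs are below) =====
def Claim_equal_agg_rank_x : Prop := ∀ (vec : List Int), Dom_agg_rank_x vec → Pre_agg_rank_x vec → Spec_agg_rank_x vec (agg_rank_x vec)

-- ===== LEMMAS AND PROOFS =====

-- the common value both programs compute: rank v = 1 + (# elements strictly greater than v)
def rankOf (vec : List Int) (v : Int) : Int := (vec.countP (fun u => decide (v < u)) : Int) + 1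

-- ---- A side: the max-scan fold ----

theorem maxFold_le (vec r : List Int) (js : List Nat) (m0 : Int) :
    m0 ≤ js.foldl (fun m j => if r.getD j 0 = 0 ∧ m ≤ vec.getD j 0 then vec.getD j 0 else m) m0 := by
  induction js generalizing m0 with
  | nil => simp
  | cons j tl ih =>
    simp only [List.foldl_cons]
    split_ifs with h
    · exact le_trans h.2 (ih _)
    · exact ih _

theorem maxFold_ub (vec r : List Int) (js : List Nat) (m0 : Int) :
    ∀ j ∈ js, r.getD j 0 = 0 →
      vec.getD j 0 ≤ js.foldl (fun m j => if r.getD j 0 = 0 ∧ m ≤ vec.getD j 0 then vec.getD j 0 else m) m0 := by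
  induction js generalizing m0 with
  | nil => simp
  | cons k tl ih =>
    intro j hj hr
    simp only [List.foldl_cons]
    rcases List.mem_cons.mp hj with h | h
    · subst h
      by_cases hle : m0 ≤ vec.getD j 0
      · rw [if_pos ⟨hr, hle⟩]; exact maxFold_le vec r tl _
      · rw [if_neg (by tauto)]
        exact le_trans (le_of_not_ge hle) (maxFold_le vec r tl _)
    · exact ih _ j h hr

theorem maxFold_attained (vec r : List Int) (js : List Nat) (m0 : Int) :
    js.foldl (fun m j => if r.getD j 0 = 0 ∧ m ≤ vec.getD j 0 then vec.getD j 0 else m) m0 = m0 ∨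
    ∃ j ∈ js, r.getD j 0 = 0 ∧ vec.getD j 0 =
      js.foldl (fun m j => if r.getD j 0 = 0 ∧ m ≤ vec.getD j 0 then vec.getD j 0 else m) m0 := by
  induction js generalizing m0 with
  | nil => simp
  | cons k tl ih =>
    simp only [List.foldl_cons]
    split_ifs with h
    · rcases ih (vec.getD k 0) with h' | ⟨j, hj, hr, he⟩
      · exact Or.inr ⟨k, List.mem_cons_self .., h.1, h'.symm ▸ h'⟩
      · exact Or.inr ⟨j, List.mem_cons_of_mem _ hj, hr, he⟩
    · rcases ih m0 with h' | ⟨j, hj, hr, he⟩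
      · exact Or.inl h'
      · exact Or.inr ⟨j, List.mem_cons_of_mem _ hj, hr, he⟩

-- ---- A side: the assignment fold ----

theorem assignFold_len (vec : List Int) (e t : Int) (js : List Nat) (r : List Int) (c : Int) :
    (js.foldl (fun (s : List Int × Int) j =>
      if vec.getD j 0 = e then (s.1.set j t, s.2 + 1) else s) (r, c)).1.length = r.length := by
  induction js generalizing r c with
  | nil => rfl
  | cons k tl ih =>
    simp only [List.foldl_cons]
    split_ifs with h
    · rw [ih]; simp
    · exact ih r c

theorem assignFold_count (vec : List Int) (e t : Int) (js : List Nat) (r : List Int) (c : Int) :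
    (js.foldl (fun (s : List Int × Int) j =>
      if vec.getD j 0 = e then (s.1.set j t, s.2 + 1) else s) (r, c)).2
    = c + (js.countP (fun j => decide (vec.getD j 0 = e)) : Int) := by
  induction js generalizing r c with
  | nil => simp
  | cons k tl ih =>
    simp only [List.foldl_cons, List.countP_cons, decide_eq_true_eq]
    by_cases h : vec.getD k 0 = e
    · rw [if_pos h, ih, if_pos h]; push_cast; ring
    · rw [if_neg h, ih, if_neg h]; push_cast; ring

theorem assignFold_getD (vec : List Int) (e t : Int) (js : List Nat) (r : List Int) (c : Int)
    (hjs : ∀ j ∈ js, j < r.length) (i : Nat) :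
    (js.foldl (fun (s : List Int × Int) j =>
      if vec.getD j 0 = e then (s.1.set j t, s.2 + 1) else s) (r, c)).1.getD i 0
    = if i ∈ js ∧ vec.getD i 0 = e then t else r.getD i 0 := by
  induction js generalizing r c with
  | nil => simp
  | cons k tl ih =>
    simp only [List.foldl_cons]
    have hk : k < r.length := hjs k (List.mem_cons_self ..)
    split_ifs with h h2 h2
    · -- vec[k] = e
      rw [ih (r.set k t) (c+1) (by intro j hj; simpa using hjs j (List.mem_cons_of_mem _ hj))]
      rcases h2 with ⟨hi, hvi⟩
      by_cases hmem : i ∈ tl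
      · rw [if_pos ⟨hmem, hvi⟩]
      · have hik : i = k := by rcases List.mem_cons.mp hi with h' | h' <;> tauto
        subst hik
        rw [if_neg (by tauto)]
        simp [List.getD_eq_getElem?_getD, hk]
    · rw [ih (r.set k t) (c+1) (by intro j hj; simpa using hjs j (List.mem_cons_of_mem _ hj))]
      have hik : i ≠ k := by
        intro hik; subst hik; exact h2 ⟨List.mem_cons_self .., h⟩
      have hnt : ¬ (i ∈ tl ∧ vec.getD i 0 = e) := by
        intro ⟨hi, hv⟩; exact h2 ⟨List.mem_cons_of_mem _ hi, hv⟩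
      rw [if_neg hnt]
      simp [List.getD_eq_getElem?_getD, List.getElem?_set_ne (Ne.symm hik)]
    · rw [ih r c (fun j hj => hjs j (List.mem_cons_of_mem _ hj))]
      rcases h2 with ⟨hi, hvi⟩
      have : i ∈ tl := by
        rcases List.mem_cons.mp hi with h' | h'
        · exfalso; exact h (h' ▸ hvi)
        · exact h'
      rw [if_pos ⟨this, hvi⟩]
    · rw [ih r c (fun j hj => hjs j (List.mem_cons_of_mem _ hj))]
      rw [if_neg (by intro ⟨hi, hv⟩; exact h2 ⟨List.mem_cons_of_mem _ hi, hv⟩)]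

-- map over range recovers the list
theorem map_getD_range (l : List Int) :
    (List.range l.length).map (fun j => l.getD j 0) = l := by
  apply List.ext_getElem
  · simp
  · intro i h1 h2
    simp [List.getD_eq_getElem?_getD, List.getElem?_eq_getElem h2]

theorem countP_range (vec : List Int) (p : Int → Bool) :
    (List.range vec.length).countP (fun j => p (vec.getD j 0)) = vec.countP p := by
  conv_rhs => rw [← map_getD_range vec]
  rw [List.countP_map]
  rfl

-- countP split at a value
theorem countP_le_split (vec : List Int) (M : Int) :
    vec.countP (fun u => decide (M ≤ u))
    = vec.countP (fun u => decide (M < u)) + vec.countP (fun u => decide (u = M)) := by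
  induction vec with
  | nil => simp
  | cons x tl ih =>
    simp only [List.countP_cons, ih, decide_eq_true_eq]
    split_ifs <;> omega

-- final state: when everything is assigned, r is the rank map
theorem inv_final (vec r : List Int) (t n : Int)
    (hlen : r.length = vec.length)
    (hset : ∀ i, i < vec.length → t ≤ vec.getD i 0 → r.getD i 0 = rankOf vec (vec.getD i 0))
    (hn : n = (vec.countP (fun u => decide (t ≤ u)) : Int))
    (hge : (vec.length : Int) ≤ n) :
    r = vec.map (rankOf vec) := by
  have hcnt : vec.countP (fun u => decide (t ≤ u)) = vec.length := by
    have := List.countP_le_length (l := vec) (p := fun u => decide (t ≤ u))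
    omega
  have hall : ∀ u ∈ vec, t ≤ u := by
    have := (List.countP_eq_length (l := vec) (p := fun u => decide (t ≤ u))).mp hcnt
    intro u hu; simpa using this u hu
  apply List.ext_getElem
  · simp [hlen]
  · intro i h1 h2
    have hi : i < vec.length := by simpa using h2
    have hv : vec.getD i 0 = vec[i] := by
      simp [List.getD_eq_getElem?_getD, List.getElem?_eq_getElem hi]
    have hr : r.getD i 0 = r[i] := by
      simp [List.getD_eq_getElem?_getD, List.getElem?_eq_getElem h1]
    have h3 := hset i hi (by rw [hv]; exact hall vec[i] (List.getElem_mem hi))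
    rw [hv, hr] at h3
    simpa using h3

-- main A-side loop invariant
theorem aggLoop_eq (vec : List Int) (hpre : ∀ x ∈ vec, 0 ≤ x) :
    ∀ (fuel : Nat) (r : List Int) (t n : Int),
      r.length = vec.length →
      (∀ i, i < vec.length → t ≤ vec.getD i 0 → r.getD i 0 = rankOf vec (vec.getD i 0)) →
      (∀ i, i < vec.length → vec.getD i 0 < t → r.getD i 0 = 0) →
      n = (vec.countP (fun u => decide (t ≤ u)) : Int) →
      (vec.length : Int) - n ≤ (fuel : Int) →
      aggLoop vec fuel r n = vec.map (rankOf vec) := by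
  intro fuel
  induction fuel with
  | zero =>
    intro r t n hlen hset hzero hn hfuel
    have hge : (vec.length : Int) ≤ n := by push_cast at hfuel; omega
    simpa [aggLoop] using inv_final vec r t n hlen hset hn hge
  | succ f ih =>
    intro r t n hlen hset hzero hn hfuel
    by_cases hlt : n < (vec.length : Int)
    · rw [aggLoop]
      simp only [if_pos hlt]
      set M := (List.range vec.length).foldl
        (fun m j => if r.getD j 0 = 0 ∧ m ≤ vec.getD j 0 then vec.getD j 0 else m) 0 with hMdef
      set P := (List.range vec.length).foldl
        (fun (s : List Int × Int) j =>
          if vec.getD j 0 = M then (s.1.set j (n + 1), s.2 + 1) else s) (r, (0:Int)) with hPdef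
      have hF1 : ∀ v, (0:Int) < rankOf vec v := by
        intro v
        unfold rankOf
        have : (0:Int) ≤ (vec.countP (fun u => decide (v < u)) : Int) := Int.natCast_nonneg _
        omega
      have hzero_iff : ∀ j, j < vec.length → (r.getD j 0 = 0 ↔ vec.getD j 0 < t) := by
        intro j hj
        constructor
        · intro h0
          by_contra hts
          have h1 := hset j hj (le_of_not_gt hts)
          rw [h0] at h1
          exact absurd h1.symm (ne_of_gt (hF1 _))
        · exact hzero j hj
      have hmemD : ∀ j, j < vec.length → vec.getD j 0 ∈ vec := by
        intro j hj
        have h : vec.getD j 0 = vec[j] := by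
          simp [List.getD_eq_getElem?_getD, List.getElem?_eq_getElem hj]
        rw [h]
        exact List.getElem_mem hj
      have hidx : ∀ u ∈ vec, ∃ j, j < vec.length ∧ vec.getD j 0 = u := by
        intro u hu
        rcases List.mem_iff_getElem.mp hu with ⟨j, hj, he⟩
        exact ⟨j, hj, by simp [List.getD_eq_getElem?_getD, List.getElem?_eq_getElem hj, he]⟩
      have hex : ∃ u ∈ vec, u < t := by
        by_contra hno
        push Not at hno
        have hl : vec.countP (fun u => decide (t ≤ u)) = vec.length :=
          List.countP_eq_length.mpr (by intro u hu; simpa using hno u hu)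
        rw [hl] at hn
        omega
      have hM0 : (0:Int) ≤ M := by rw [hMdef]; exact maxFold_le vec r _ 0
      have hub : ∀ j, j < vec.length → vec.getD j 0 < t → vec.getD j 0 ≤ M := by
        intro j hj hjt
        rw [hMdef]
        exact maxFold_ub vec r _ 0 j (List.mem_range.mpr hj) ((hzero_iff j hj).mpr hjt)
      have hwit : ∃ j, j < vec.length ∧ vec.getD j 0 < t ∧ vec.getD j 0 = M := by
        rcases maxFold_attained vec r (List.range vec.length) 0 with hA | ⟨j, hj, hr0, he⟩
        · rcases hex with ⟨u, hu, hut⟩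
          rcases hidx u hu with ⟨j, hj, hje⟩
          have h1 : vec.getD j 0 ≤ M := hub j hj (by rw [hje]; exact hut)
          have h2 : (0:Int) ≤ vec.getD j 0 := by rw [hje]; exact hpre u hu
          have hMz : M = 0 := by rw [hMdef]; exact hA
          exact ⟨j, hj, by rw [hje]; exact hut, by omega⟩
        · have hjlt := List.mem_range.mp hj
          exact ⟨j, hjlt, (hzero_iff j hjlt).mp hr0, by rw [hMdef]; exact he⟩
      obtain ⟨jw, hjw, hjwt, hjwM⟩ := hwit
      have hMt : M < t := hjwM ▸ hjwt
      have hkey : ∀ u ∈ vec, (M < u ↔ t ≤ u) := by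
        intro u hu
        constructor
        · intro hMu
          by_contra hts
          push Not at hts
          rcases hidx u hu with ⟨j, hj, hje⟩
          have h1 := hub j hj (by rw [hje]; exact hts)
          rw [hje] at h1
          omega
        · intro h; omega
      have hcntEq : vec.countP (fun u => decide (t ≤ u)) = vec.countP (fun u => decide (M < u)) := by
        apply List.countP_congr
        intro u hu
        constructor
        · intro h; exact decide_eq_true ((hkey u hu).mpr (of_decide_eq_true h))
        · intro h; exact decide_eq_true ((hkey u hu).mp (of_decide_eq_true h))
      have hPlen : P.1.length = r.length := by rw [hPdef]; exact assignFold_len vec M (n+1) _ r 0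
      have hPc : P.2 = (vec.countP (fun u => decide (u = M)) : Int) := by
        rw [hPdef, assignFold_count vec M (n+1), countP_range vec (fun u => decide (u = M))]
        ring
      have hPgetD : ∀ i, P.1.getD i 0
          = if i ∈ List.range vec.length ∧ vec.getD i 0 = M then n + 1 else r.getD i 0 := by
        intro i
        rw [hPdef]
        exact assignFold_getD vec M (n+1) _ r 0
          (by intro j hj; rw [hlen]; exact List.mem_range.mp hj) i
      apply ih P.1 M (n + P.2)
      · rw [hPlen, hlen]
      · intro i hi hMle
        rcases eq_or_lt_of_le hMle with heq | hlt2
        · have hPi : P.1.getD i 0 = n + 1 := by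
            rw [hPgetD i, if_pos ⟨List.mem_range.mpr hi, heq.symm⟩]
          rw [hPi, ← heq]
          unfold rankOf
          rw [hn, hcntEq]
        · have hne : vec.getD i 0 ≠ M := ne_of_gt hlt2
          have hPi : P.1.getD i 0 = r.getD i 0 := by
            rw [hPgetD i, if_neg (fun h => hne h.2)]
          rw [hPi]
          exact hset i hi ((hkey _ (hmemD i hi)).mp hlt2)
      · intro i hi hiM
        have hne : vec.getD i 0 ≠ M := ne_of_lt hiM
        have hPi : P.1.getD i 0 = r.getD i 0 := by
          rw [hPgetD i, if_neg (fun h => hne h.2)]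
        rw [hPi]
        exact hzero i hi (by omega)
      · rw [hPc, hn]
        have h1 := hcntEq
        have h2 := countP_le_split vec M
        omega
      · have hMmem : M ∈ vec := hjwM ▸ hmemD jw hjw
        have hpos : 0 < vec.countP (fun u => decide (u = M)) :=
          List.countP_pos_iff.mpr ⟨M, hMmem, by simp⟩
        rw [hPc]
        push_cast at hfuel ⊢
        omega
    · rw [aggLoop]
      simp only [if_neg hlt]
      exact inv_final vec r t n hlen hset hn (by omega)

-- ---- B side ----

-- keys not in the iterated list are untouched by the rank fold
theorem rankFold_untouched (g : Int → Int) (ks : List Int) (d : PySem.Dict Int Int) (acc k : Int)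
    (hk : k ∉ ks) :
    ((ks.foldl (fun (s : PySem.Dict Int Int × Int) v => (s.1.insert v (s.2 + 1), s.2 + g v)) (d, acc)).1).getD k 0
    = d.getD k 0 := by
  induction ks generalizing d acc with
  | nil => rfl
  | cons v tl ih =>
    simp only [List.foldl_cons]
    rw [ih _ _ (fun h => hk (List.mem_cons_of_mem _ h))]
    have hne : k ≠ v := fun h => hk (h ▸ List.mem_cons_self ..)
    rw [PySem.Dict.getD_insert]
    exact if_neg hne

-- the rank fold assigns acc + (sum of g over strictly-greater keys) + 1
theorem rankFold_getD (g : Int → Int) (ks : List Int) (d : PySem.Dict Int Int) (acc : Int)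
    (hsort : ks.Pairwise (fun a b => a > b)) (v : Int) (hv : v ∈ ks) :
    ((ks.foldl (fun (s : PySem.Dict Int Int × Int) u => (s.1.insert u (s.2 + 1), s.2 + g u)) (d, acc)).1).getD v 0
    = acc + ((ks.filter (fun u => decide (v < u))).map g).sum + 1 := by
  induction ks generalizing d acc with
  | nil => simp at hv
  | cons k tl ih =>
    have hgt : ∀ u ∈ tl, k > u := fun u hu => List.rel_of_pairwise_cons hsort hu
    have htl : tl.Pairwise (fun a b => a > b) := hsort.of_cons
    simp only [List.foldl_cons, List.filter_cons]
    rcases List.mem_cons.mp hv with hvk | hvtl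
    · subst hvk
      have hnot : v ∉ tl := fun h => absurd (hgt v h) (lt_irrefl v)
      rw [rankFold_untouched g tl _ _ v hnot]
      rw [PySem.Dict.getD_insert_self]
      have : (decide (v < v)) = false := by simp
      rw [this]
      have : tl.filter (fun u => decide (v < u)) = [] := by
        apply List.filter_eq_nil_iff.mpr
        intro u hu
        simp only [decide_eq_true_eq]
        exact not_lt.mpr (le_of_lt (hgt u hu))
      simp [this]
    · have hvk : v < k := hgt v hvtl
      rw [ih _ _ htl hvtl]
      simp only [decide_eq_true_eq]
      rw [if_pos hvk]
      simp only [List.map_cons, List.sum_cons]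
      ring

-- splitting countP at one value satisfying q
theorem countP_split_at (q : Int → Bool) (k : Int) (hqk : q k = true) (vec : List Int) :
    vec.countP q = vec.count k + vec.countP (fun a => q a && decide (¬ a = k)) := by
  induction vec with
  | nil => simp
  | cons x tl ih =>
    simp only [List.countP_cons, List.count_cons, ih]
    by_cases hx : x = k
    · subst hx
      simp only [hqk]
      simp
      omega
    · simp only [hx, decide_false, decide_not]
      by_cases hq : q x = true <;> simp [hq, hx]
      omega

-- sum of per-value counts over distinct values = countP
theorem sum_counts_eq_countP (q : Int → Bool) :
    ∀ (ks vec : List Int), ks.Nodup →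
      (∀ u ∈ vec, q u = true → u ∈ ks) → (∀ u ∈ ks, q u = true) →
      (ks.map (fun u => vec.count u)).sum = vec.countP q := by
  intro ks
  induction ks with
  | nil =>
    intro vec _ hcov _
    simp only [List.map_nil, List.sum_nil]
    symm
    apply List.countP_eq_zero.mpr
    intro u hu hq
    exact absurd (hcov u hu hq) (List.not_mem_nil)
  | cons k tl ih =>
    intro vec hnd hcov hall
    have hknotl : k ∉ tl := (List.nodup_cons.mp hnd).1
    have hndtl : tl.Nodup := (List.nodup_cons.mp hnd).2
    simp only [List.map_cons, List.sum_cons]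
    have hcnt : ∀ u ∈ tl, vec.count u = (vec.filter (fun x => decide (¬ x = k))).count u := by
      intro u hu
      rw [List.count_filter]
      simp [ne_of_mem_of_not_mem hu hknotl]
    rw [List.map_congr_left hcnt, ih (vec.filter (fun x => decide (¬ x = k))) hndtl
      (by
        intro u hu hq
        rcases List.mem_filter.mp hu with ⟨huv, hne⟩
        rcases List.mem_cons.mp (hcov u huv hq) with h | h
        · exfalso; simp at hne; exact hne h
        · exact h)
      (fun u hu => hall u (List.mem_cons_of_mem _ hu))]
    rw [List.countP_filter, countP_split_at q k (hall k (List.mem_cons_self ..)) vec]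

-- B computes the rank map
theorem alt_eq_map_rankOf (vec : List Int) :
    agg_rank_x_alt vec = vec.map (rankOf vec) := by
  unfold agg_rank_x_alt
  rw [PySem.Dict.foldl_insert_getD_add_one_eq_counter]
  set ks := PySem.List.sorted (PySem.Dict.counter vec).keys (fun x => x) true with hksdef
  have hkeys : (PySem.Dict.counter vec).keys = PySem.Set.ofList vec := PySem.Dict.keys_counter vec
  have hperm : ks.Perm (PySem.Set.ofList vec) := by
    rw [hksdef, hkeys]
    exact PySem.List.sorted_perm _ _ _
  have hnodup : ks.Nodup := hperm.nodup_iff.mpr (PySem.Set.nodup_ofList vec)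
  have hge : ks.Pairwise (fun a b => b ≤ a) := by
    rw [hksdef]
    exact PySem.List.sorted_pairwise_rev _ _
  have hpw : ks.Pairwise (fun a b => a > b) :=
    (hnodup.and hge).imp (fun h => lt_of_le_of_ne h.2 (Ne.symm h.1))
  have hmemks : ∀ v, v ∈ ks ↔ v ∈ vec := by
    intro v
    rw [hperm.mem_iff]
    exact PySem.Set.mem_ofList vec v
  apply List.map_congr_left
  intro v hv
  rw [rankFold_getD (fun u => (PySem.Dict.counter vec).getD u 0) ks PySem.Dict.empty 0 hpw v
    ((hmemks v).mpr hv)]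
  have hg : (ks.filter (fun u => decide (v < u))).map (fun u => (PySem.Dict.counter vec).getD u 0)
      = (ks.filter (fun u => decide (v < u))).map (fun u => ((vec.count u : Int))) :=
    List.map_congr_left (fun u _ => PySem.Dict.getD_counter ..)
  rw [hg]
  have hcast : ((ks.filter (fun u => decide (v < u))).map (fun u => ((vec.count u : Int)))).sum
      = (((ks.filter (fun u => decide (v < u))).map (fun u => vec.count u)).sum : Int) := by
    induction (ks.filter (fun u => decide (v < u))) with
    | nil => simp
    | cons a tl ih => simp [ih]
  rw [hcast, sum_counts_eq_countP (fun u => decide (v < u)) _ vec (hnodup.filter _)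
    (fun u hu hq => List.mem_filter.mpr ⟨(hmemks u).mpr hu, hq⟩)
    (fun u hu => (List.mem_filter.mp hu).2)]
  unfold rankOf
  ring

-- ===== VERDICT (by name: the statement is the Claim_ definition above) =====
theorem agg_rank_x_spec : Claim_equal_agg_rank_x := by
  intro vec hdom hpre
  unfold Spec_agg_rank_x
  rw [alt_eq_map_rankOf]
  unfold agg_rank_x
  have hbound : ∀ u ∈ vec, u ≤ 2147483648 := by
    intro u hu
    have := (List.all_eq_true.mp hdom) u hu
    simp [pvDomInt] at this
    omega
  apply aggLoop_eq vec hpre vec.length (List.replicate vec.length 0) 2147483649 0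
  · simp
  · intro i hi ht
    exfalso
    have hv : vec.getD i 0 = vec[i] := by
      simp [List.getD_eq_getElem?_getD, List.getElem?_eq_getElem hi]
    have := hbound vec[i] (List.getElem_mem hi)
    omega
  · intro i hi _
    simp [List.getD_eq_getElem?_getD, hi]
  · have h0 : vec.countP (fun u => decide ((2147483649:Int) ≤ u)) = 0 := by
      apply List.countP_eq_zero.mpr
      intro u hu
      have := hbound u hu
      simp
      omega
    rw [h0]
    simp
  · simp
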